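-- pv_equiv track=rewrite | github.com/arsenyvolodko/telegram-bot | main.py | get_character_quiz_result
-- ===== SOURCE A (Python) =====
-- def get_character_quiz_result(score: list):
--     max_score = -1
--     res = -1
--     for i in range(1, 7):
--         cur_score = score.count(i)
--         if cur_score > max_score:
--             max_score = cur_score
--             res = i
--     return res
-- ===== SOURCE B (Python) =====
-- def get_character_quiz_result(score: list):
--     # One streaming pass: maintain per-value counts and the running mode
--     # (lowest value wins ties) instead of six separate .count scans.
--     cnt = {}
--     best_v, best_c = 1, 0
--     for v in score:
--         if 1 <= v <= 6:
--             c = cnt.get(v, 0) + 1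
--             cnt[v] = c
--             if c > best_c or (c == best_c and v < best_v):
--                 best_v, best_c = v, c
--     return best_v
-- ===== Notes on version B (the rewrite author's own statement) =====
-- stated objective: alternative
-- what changed: A makes six candidate-driven .count scans over the data with a compare-and-update loop over 1..6; B makes ONE streaming pass over the data, maintaining a dict of counts and the running mode incrementally (a new count wins if strictly larger, or equal with a smaller value), so no pass over the candidate range remains.
import Mathlib
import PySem

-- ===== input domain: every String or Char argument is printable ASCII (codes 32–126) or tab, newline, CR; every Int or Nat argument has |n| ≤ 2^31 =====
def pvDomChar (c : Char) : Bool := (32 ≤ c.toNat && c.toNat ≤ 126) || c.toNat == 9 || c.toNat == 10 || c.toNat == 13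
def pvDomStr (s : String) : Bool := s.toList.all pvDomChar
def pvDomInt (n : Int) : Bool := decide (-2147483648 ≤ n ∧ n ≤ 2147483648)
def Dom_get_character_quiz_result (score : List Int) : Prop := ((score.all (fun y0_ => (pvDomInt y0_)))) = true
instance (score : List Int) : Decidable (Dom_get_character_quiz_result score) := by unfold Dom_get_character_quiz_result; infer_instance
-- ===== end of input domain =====

-- B replaces A's six candidate-driven .count scans with ONE streaming pass over the data that
-- maintains a dict of counts and the running mode (lowest value wins ties); objective: alternative.

-- ===== PORT A =====
def get_character_quiz_result (score : List Int) : Int :=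
  let st := (PySem.List.pyRange 1 7 1).foldl
    (fun (s : Int × Int) i =>
      let cur_score : Int := PySem.List.count score i
      if cur_score > s.1 then (cur_score, i) else s)
    (-1, -1)
  st.2

-- ===== PORT B =====
-- the loop body of Source B's single for-loop
def bStep (s : PySem.Dict Int Int × Int × Int) (v : Int) :
    PySem.Dict Int Int × Int × Int :=
  if 1 ≤ v ∧ v ≤ 6 then
    let c := s.1.getD v 0 + 1
    let cnt := s.1.insert v c
    if c > s.2.2 ∨ (c = s.2.2 ∧ v < s.2.1) then (cnt, v, c) else (cnt, s.2.1, s.2.2)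
  else s

def get_character_quiz_result_alt (score : List Int) : Int :=
  (score.foldl bStep (PySem.Dict.empty, 1, 0)).2.1

-- ===== PRECONDITION & SPEC =====
def Spec_get_character_quiz_result (score : List Int) (out : Int) : Prop := out = get_character_quiz_result_alt score
instance (score : List Int) (out : Int) : Decidable (Spec_get_character_quiz_result score out) := by unfold Spec_get_character_quiz_result; infer_instance

-- ===== CLAIM =====
def Claim_equal_get_character_quiz_result : Prop := ∀ (score : List Int), Dom_get_character_quiz_result score → Spec_get_character_quiz_result score (get_character_quiz_result score)

-- ===== LEMMAS AND PROOFS =====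

-- loop invariant of B's single pass over the prefix p:
-- the dict holds the counts of 1..6, and (best_v, best_c) is the running mode
-- (best_c = count of best_v, it is maximal, and every smaller value is strictly below it)
def BInv (p : List Int) (s : PySem.Dict Int Int × Int × Int) : Prop :=
  (∀ k : Int, 1 ≤ k → k ≤ 6 → s.1.getD k 0 = (p.count k : Int)) ∧
  1 ≤ s.2.1 ∧ s.2.1 ≤ 6 ∧
  s.2.2 = (p.count s.2.1 : Int) ∧
  (∀ k : Int, 1 ≤ k → k ≤ 6 →
    ((p.count k : Int) ≤ s.2.2 ∧ (k < s.2.1 → (p.count k : Int) < s.2.2)))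

theorem count_append_singleton (p : List Int) (v k : Int) :
    ((p ++ [v]).count k : Int) = (p.count k : Int) + (if v = k then 1 else 0) := by
  by_cases h : v = k <;> simp [List.count_append, h]

theorem bStep_inv (p : List Int) (s : PySem.Dict Int Int × Int × Int) (v : Int)
    (h : BInv p s) : BInv (p ++ [v]) (bStep s v) := by
  obtain ⟨hd, hb1, hb6, hbc, hmax⟩ := h
  by_cases hv : 1 ≤ v ∧ v ≤ 6
  · have hcv : s.1.getD v 0 = (p.count v : Int) := hd v hv.1 hv.2
    by_cases hcond : s.1.getD v 0 + 1 > s.2.2 ∨ (s.1.getD v 0 + 1 = s.2.2 ∧ v < s.2.1)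
    · -- best updated to (v, c)
      simp only [bStep, if_pos hv, if_pos hcond]
      refine ⟨?_, hv.1, hv.2, ?_, ?_⟩
      · intro k h1 h6
        rw [PySem.Dict.getD_insert]
        simp only [count_append_singleton]
        rcases eq_or_ne k v with rfl | hne
        · simp [hcv]
        · simp [hne, Ne.symm hne, hd k h1 h6]
      · simp only [count_append_singleton]; simp [hcv]
      · intro k h1 h6
        have h5 := hmax k h1 h6
        simp only [count_append_singleton]
        rcases eq_or_ne v k with rfl | hne
        · simp [hcv]
        · have h5' := hmax v hv.1 hv.2
          simp only [if_neg hne, add_zero]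
          constructor
          · omega
          · intro hkv
            rcases hcond with hgt | ⟨heq, hlt⟩
            · omega
            · have := h5.2 (by omega); omega
    · -- best unchanged
      simp only [bStep, if_pos hv, if_neg hcond]
      have hvb : v ≠ s.2.1 := by
        intro hvb
        have : s.2.2 = (p.count v : Int) := by rw [hbc, hvb]
        omega
      refine ⟨?_, hb1, hb6, ?_, ?_⟩
      · intro k h1 h6
        rw [PySem.Dict.getD_insert]
        simp only [count_append_singleton]
        rcases eq_or_ne k v with rfl | hne
        · simp [hcv]
        · simp [hne, Ne.symm hne, hd k h1 h6]
      · simp only [count_append_singleton]; rw [if_neg hvb, add_zero, hbc]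
      · intro k h1 h6
        have h5 := hmax k h1 h6
        simp only [count_append_singleton]
        rcases eq_or_ne v k with rfl | hne
        · constructor
          · omega
          · intro hkv; omega
        · simp only [if_neg hne, add_zero]
          exact h5
  · -- v outside 1..6: state unchanged, counts of 1..6 unchanged
    simp only [bStep, if_neg hv]
    have hne : ∀ k : Int, 1 ≤ k → k ≤ 6 → v ≠ k := by intro k h1 h6 h; omega
    refine ⟨?_, hb1, hb6, ?_, ?_⟩
    · intro k h1 h6
      rw [count_append_singleton, if_neg (hne k h1 h6), add_zero]; exact hd k h1 h6
    · rw [count_append_singleton, if_neg (hne _ hb1 hb6), add_zero]; exact hbc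
    · intro k h1 h6
      simp only [count_append_singleton]
      rw [if_neg (hne k h1 h6), add_zero]; exact hmax k h1 h6

theorem foldl_bStep_inv :
    ∀ (l p : List Int) (s : PySem.Dict Int Int × Int × Int),
      BInv p s → BInv (p ++ l) (l.foldl bStep s) := by
  intro l
  induction l with
  | nil => intro p s h; simpa using h
  | cons v t ih =>
    intro p s h
    have := ih (p ++ [v]) (bStep s v) (bStep_inv p s v h)
    simpa using this

-- ===== VERDICT =====
set_option maxHeartbeats 1600000 in
theorem get_character_quiz_result_spec : Claim_equal_get_character_quiz_result := by
  intro score _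
  unfold Spec_get_character_quiz_result
  have hinv : BInv score (score.foldl bStep (PySem.Dict.empty, 1, 0)) := by
    have h0 : BInv [] ((PySem.Dict.empty : PySem.Dict Int Int), 1, 0) := by
      refine ⟨?_, by norm_num, by norm_num, by simp, ?_⟩
      · intro k _ _; simp [PySem.Dict.getD]
      · intro k hk _
        dsimp only
        refine ⟨by simp, fun h => by omega⟩
    simpa using foldl_bStep_inv score [] _ h0
  set st := score.foldl bStep (PySem.Dict.empty, 1, 0) with hst
  obtain ⟨-, hb1, hb6, hbc, hmax⟩ := hinv
  unfold get_character_quiz_result get_character_quiz_result_alt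
  rw [← hst]
  rw [show PySem.List.pyRange 1 7 1 = [1, 2, 3, 4, 5, 6] from by decide]
  simp only [List.foldl_cons, List.foldl_nil, PySem.List.count_eq, gt_iff_lt]
  have h1 := hmax 1 (by norm_num) (by norm_num)
  have h2 := hmax 2 (by norm_num) (by norm_num)
  have h3 := hmax 3 (by norm_num) (by norm_num)
  have h4 := hmax 4 (by norm_num) (by norm_num)
  have h5 := hmax 5 (by norm_num) (by norm_num)
  have h6 := hmax 6 (by norm_num) (by norm_num)
  interval_cases hbv : st.2.1 <;>
    (split_ifs <;> dsimp only <;> omega)
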